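-- pv_equiv track=rewrite | github.com/tom-damari/job-posting-fraud-detection | Part B/PartB.py | categorize_industry
-- ===== SOURCE A (Python) =====
-- def categorize_industry(industry):
--     if isinstance(industry, str):
--         if any(substring in industry.lower() for substring in
--                ['internet', 'data', 'computer', 'information', 'technology', 'computer software', 'telecommunications',
--                 'information technology and services', 'computer networking', 'computer & network security',
--                 'computer hardware', 'semiconductors', 'wireless']):
--             return 'technology'
--         elif any(substring in industry.lower() for substring in
--                  ['medical practice', 'pharmaceuticals', 'hospital & health care',
--                   'cosmetics', 'health, wellness and fitness', 'medical devices',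
--                   'mental health care', 'health', 'medical']):
--             return 'health'
--         elif any(substring in industry.lower() for substring in
--                  ['financial services', 'finance', 'insurance', 'venture capital & private equity',
--                   'investment banking', 'investment management', 'capital markets']):
--             return 'finance'
--         elif any(substring in industry.lower() for substring in
--                  ['retail', 'consumer services', 'consumer electronics', 'consumer goods',
--                   'restaurants', 'apparel & fashion', 'sporting goods', 'luxury goods & jewelry', 'cosmetics']):
--             return 'retail'
--         elif any(substring in industry.lower() for substring in
--                  ['oil & energy', 'building materials', 'materials',
--                   'electrical/electronic manufacturing',
--                   'mechanical or industrial engineering', 'machinery',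
--                   'renewables & environment', 'plastics']):
--             return 'manufacturing'
--         else:
--             return 'other'
--     else:
--         return industry
-- ===== SOURCE B (Python) =====
-- LABELS = ['technology', 'health', 'finance', 'retail', 'manufacturing']
--
-- # Flat inverted index keyword -> category rank (lower rank = higher precedence).
-- KEYWORDS = [(sub, rank) for rank, subs in enumerate([
--     ['internet', 'data', 'computer', 'information', 'technology', 'computer software', 'telecommunications',
--      'information technology and services', 'computer networking', 'computer & network security',
--      'computer hardware', 'semiconductors', 'wireless'],
--     ['medical practice', 'pharmaceuticals', 'hospital & health care',
--      'cosmetics', 'health, wellness and fitness', 'medical devices',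
--      'mental health care', 'health', 'medical'],
--     ['financial services', 'finance', 'insurance', 'venture capital & private equity',
--      'investment banking', 'investment management', 'capital markets'],
--     ['retail', 'consumer services', 'consumer electronics', 'consumer goods',
--      'restaurants', 'apparel & fashion', 'sporting goods', 'luxury goods & jewelry', 'cosmetics'],
--     ['oil & energy', 'building materials', 'materials',
--      'electrical/electronic manufacturing',
--      'mechanical or industrial engineering', 'machinery',
--      'renewables & environment', 'plastics'],
-- ]) for sub in subs]
--
--
-- def categorize_industry(industry):
--     if not isinstance(industry, str):
--         return industry
--     low = industry.lower()
--     hits = [rank for sub, rank in KEYWORDS if sub in low]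
--     return LABELS[min(hits)] if hits else 'other'
-- ===== Notes on version B (the rewrite author's own statement) =====
-- stated objective: alternative
-- what changed: Replaces the five-branch first-match if/elif cascade by a flat inverted index (keyword, rank): B collects the ranks of ALL matching keywords in one comprehension and maps the minimum rank to its label (no early exit, no per-category any), with the same fallback when nothing matches.
import Mathlib
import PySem

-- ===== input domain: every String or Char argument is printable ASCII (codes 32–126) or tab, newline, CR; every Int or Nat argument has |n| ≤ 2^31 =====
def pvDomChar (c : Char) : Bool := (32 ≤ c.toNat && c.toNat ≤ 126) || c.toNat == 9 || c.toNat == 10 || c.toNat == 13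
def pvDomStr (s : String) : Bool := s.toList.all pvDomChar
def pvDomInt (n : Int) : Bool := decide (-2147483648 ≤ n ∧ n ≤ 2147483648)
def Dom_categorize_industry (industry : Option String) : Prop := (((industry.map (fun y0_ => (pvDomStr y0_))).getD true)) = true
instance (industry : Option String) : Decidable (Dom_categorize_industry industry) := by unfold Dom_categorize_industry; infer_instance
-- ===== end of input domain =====

-- B replaces A's first-match if/elif cascade by a flat inverted index (keyword, rank): it collects the ranks of all matching keywords and returns the label of the minimum rank (alternative decomposition, same cost).


-- ===== PORT A =====
def categorize_industry (industry : Option String) : Option String :=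
  match industry with
  | none => none          -- not a str: returned unchanged
  | some s =>
    if ["internet", "data", "computer", "information", "technology", "computer software", "telecommunications",
        "information technology and services", "computer networking", "computer & network security",
        "computer hardware", "semiconductors", "wireless"].any
         (fun sub => PySem.Str.isIn sub (PySem.Str.lower s)) then some "technology"
    else if ["medical practice", "pharmaceuticals", "hospital & health care",
             "cosmetics", "health, wellness and fitness", "medical devices",
             "mental health care", "health", "medical"].any
         (fun sub => PySem.Str.isIn sub (PySem.Str.lower s)) then some "health"
    else if ["financial services", "finance", "insurance", "venture capital & private equity",
             "investment banking", "investment management", "capital markets"].any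
         (fun sub => PySem.Str.isIn sub (PySem.Str.lower s)) then some "finance"
    else if ["retail", "consumer services", "consumer electronics", "consumer goods",
             "restaurants", "apparel & fashion", "sporting goods", "luxury goods & jewelry", "cosmetics"].any
         (fun sub => PySem.Str.isIn sub (PySem.Str.lower s)) then some "retail"
    else if ["oil & energy", "building materials", "materials",
             "electrical/electronic manufacturing",
             "mechanical or industrial engineering", "machinery",
             "renewables & environment", "plastics"].any
         (fun sub => PySem.Str.isIn sub (PySem.Str.lower s)) then some "manufacturing"
    else some "other"

-- ===== PORT B =====
def pvLabels : List String := ["technology", "health", "finance", "retail", "manufacturing"]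

-- the flat inverted index KEYWORDS: (keyword, category rank)
def pvKeywords : List (String × Int) :=
  [("internet", 0), ("data", 0), ("computer", 0), ("information", 0), ("technology", 0),
   ("computer software", 0), ("telecommunications", 0), ("information technology and services", 0),
   ("computer networking", 0), ("computer & network security", 0), ("computer hardware", 0),
   ("semiconductors", 0), ("wireless", 0),
   ("medical practice", 1), ("pharmaceuticals", 1), ("hospital & health care", 1), ("cosmetics", 1),
   ("health, wellness and fitness", 1), ("medical devices", 1), ("mental health care", 1),
   ("health", 1), ("medical", 1),
   ("financial services", 2), ("finance", 2), ("insurance", 2), ("venture capital & private equity", 2),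
   ("investment banking", 2), ("investment management", 2), ("capital markets", 2),
   ("retail", 3), ("consumer services", 3), ("consumer electronics", 3), ("consumer goods", 3),
   ("restaurants", 3), ("apparel & fashion", 3), ("sporting goods", 3), ("luxury goods & jewelry", 3),
   ("cosmetics", 3),
   ("oil & energy", 4), ("building materials", 4), ("materials", 4),
   ("electrical/electronic manufacturing", 4), ("mechanical or industrial engineering", 4),
   ("machinery", 4), ("renewables & environment", 4), ("plastics", 4)]

def categorize_industry_alt (industry : Option String) : Option String :=
  match industry with
  | none => none
  | some s =>
    let low := PySem.Str.lower s
    let hits : List Int :=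
      (pvKeywords.filter (fun p => PySem.Str.isIn p.1 low)).map Prod.snd
    match PySem.List.min? hits (fun r => r) with
    | none => some "other"
    | some r => PySem.List.pyGet? pvLabels r   -- LABELS[min(hits)]; ranks are always in range

-- ===== PRECONDITION & SPEC =====
def Spec_categorize_industry (industry : Option String) (out : Option String) : Prop := out = categorize_industry_alt industry
instance (industry : Option String) (out : Option String) : Decidable (Spec_categorize_industry industry out) := by unfold Spec_categorize_industry; infer_instance

-- ===== CLAIM =====
def Claim_equal_categorize_industry : Prop := ∀ (industry : Option String), Dom_categorize_industry industry → Spec_categorize_industry industry (categorize_industry industry)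

-- ===== LEMMAS AND PROOFS =====

-- the keyword groups, in category order
def pvGroups : List (List String) :=
  [["internet", "data", "computer", "information", "technology", "computer software", "telecommunications",
    "information technology and services", "computer networking", "computer & network security",
    "computer hardware", "semiconductors", "wireless"],
   ["medical practice", "pharmaceuticals", "hospital & health care",
    "cosmetics", "health, wellness and fitness", "medical devices",
    "mental health care", "health", "medical"],
   ["financial services", "finance", "insurance", "venture capital & private equity",
    "investment banking", "investment management", "capital markets"],
   ["retail", "consumer services", "consumer electronics", "consumer goods",
    "restaurants", "apparel & fashion", "sporting goods", "luxury goods & jewelry", "cosmetics"],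
   ["oil & energy", "building materials", "materials",
    "electrical/electronic manufacturing",
    "mechanical or industrial engineering", "machinery",
    "renewables & environment", "plastics"]]

-- groups flattened with ranks starting at k
def pvFlat (gs : List (List String)) (k : Int) : List (String × Int) :=
  match gs with
  | [] => []
  | g :: rest => g.map (fun sub => (sub, k)) ++ pvFlat rest (k + 1)

-- rank of the first group containing a matching keyword
def pvFirstIdx (gs : List (List String)) (k : Int) (low : String) : Option Int :=
  match gs with
  | [] => none
  | g :: rest =>
    if g.any (fun sub => PySem.Str.isIn sub low) then some k else pvFirstIdx rest (k + 1) low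

lemma pvKeywords_eq_flat : pvKeywords = pvFlat pvGroups 0 := by rfl

lemma pvFlat_snd_ge (gs : List (List String)) (k : Int) :
    ∀ p ∈ pvFlat gs k, k ≤ p.2 := by
  induction gs generalizing k with
  | nil => intro p hp; simp [pvFlat] at hp
  | cons g rest ih =>
    intro p hp
    simp only [pvFlat, List.mem_append, List.mem_map] at hp
    rcases hp with ⟨sub, _, rfl⟩ | hp
    · exact le_refl k
    · have := ih (k + 1) p hp; omega

lemma pvMin_id_eq (xs : List Int) (m : Int) (hm : m ∈ xs) (hb : ∀ y ∈ xs, m ≤ y) :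
    PySem.List.min? xs (fun r => r) = some m := by
  cases h : PySem.List.min? xs (fun r => r) with
  | none =>
    rw [PySem.List.min?_eq_none_iff] at h
    subst h; simp at hm
  | some m' =>
    have h1 : m' ∈ xs := PySem.List.min?_mem h
    have h2 := PySem.List.min?_isMin h m hm
    have h3 := hb m' h1
    simp only at h2
    rw [le_antisymm h3 h2]

lemma pvMin_flat (gs : List (List String)) (k : Int) (low : String) :
    PySem.List.min?
      (((pvFlat gs k).filter (fun p => PySem.Str.isIn p.1 low)).map Prod.snd) (fun r => r)
      = pvFirstIdx gs k low := by
  induction gs generalizing k with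
  | nil => rfl
  | cons g rest ih =>
    simp only [pvFlat, pvFirstIdx, List.filter_append, List.map_append]
    by_cases hg : g.any (fun sub => PySem.Str.isIn sub low)
    · rw [if_pos hg]
      rcases List.any_eq_true.mp hg with ⟨sub, hsub, hP⟩
      apply pvMin_id_eq
      · apply List.mem_append_left
        refine List.mem_map.mpr ⟨(sub, k), ?_, rfl⟩
        refine List.mem_filter.mpr ⟨List.mem_map.mpr ⟨sub, hsub, rfl⟩, hP⟩
      · intro y hy
        rw [← List.map_append, ← List.filter_append] at hy
        rcases List.mem_map.mp hy with ⟨p, hp, rfl⟩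
        exact pvFlat_snd_ge (g :: rest) k p (List.mem_filter.mp hp).1
    · rw [if_neg hg]
      have hnil : (g.map (fun sub => (sub, k))).filter (fun p => PySem.Str.isIn p.1 low) = [] := by
        rw [List.filter_eq_nil_iff]
        intro p hp
        rcases List.mem_map.mp hp with ⟨sub, hsub, rfl⟩
        have h' := hg
        simp only [List.any_eq_true, not_exists, not_and] at h'
        simpa [PySem.Str.isIn] using h' sub hsub
      rw [hnil, List.map_nil, List.nil_append]
      exact ih (k + 1)

-- ===== VERDICT =====
theorem categorize_industry_spec : Claim_equal_categorize_industry := by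
  intro industry _
  unfold Spec_categorize_industry
  cases industry with
  | none => rfl
  | some s =>
    show categorize_industry (some s) = categorize_industry_alt (some s)
    unfold categorize_industry categorize_industry_alt
    simp only [pvKeywords_eq_flat, pvMin_flat]
    simp only [pvGroups, pvFirstIdx]
    split_ifs <;> rfl
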